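-- pv_equiv track=rewrite | github.com/BenjaminIrwin/compare_diffusion | compare_diffusion.py | complete_sentences
-- ===== SOURCE A (Python) =====
-- def complete_sentences(strings):
--     # Initialize an empty list to store the completed sentences
--     sentences = []
--
--     # Initialize an empty string to store the current sentence
--     current_sentence = ""
--
--     # Iterate through the strings
--     for string in strings:
--         # Add the string to the current sentence
--         current_sentence += string + " "
--
--         # If the current string ends with a quotation mark, it is the end of a sentence
--         if string[-1] == "'":
--             # Add the completed sentence to the list of sentences and reset the current sentence
--             sentences.append(current_sentence)
--             current_sentence = ""
--
--         # Return the list of sentences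
--     return sentences
-- ===== SOURCE B (Python) =====
-- def _find_end(strings, start):
--     # Index of the first apostrophe-terminated string at or after start, or None.
--     for i in range(start, len(strings)):
--         if strings[i][-1] == "'":
--             return i
--     return None
--
-- def complete_sentences(strings):
--     # Search-and-split: repeatedly locate the next sentence end, slice out
--     # that whole sentence and join it, then continue after it.
--     out = []
--     start = 0
--     while True:
--         i = _find_end(strings, start)
--         if i is None:
--             return out
--         out.append("".join(w + " " for w in strings[start:i + 1]))
--         start = i + 1
-- ===== Notes on version B (the rewrite author's own statement) =====
-- stated objective: alternative
-- what changed: Replaces A's single streaming loop with a growing string accumulator by index-based search-and-split: a helper scans for the index of the next apostrophe-terminated string, and the main loop slices out that whole sentence, joins it with str.join, and resumes after it.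
import Mathlib
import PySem

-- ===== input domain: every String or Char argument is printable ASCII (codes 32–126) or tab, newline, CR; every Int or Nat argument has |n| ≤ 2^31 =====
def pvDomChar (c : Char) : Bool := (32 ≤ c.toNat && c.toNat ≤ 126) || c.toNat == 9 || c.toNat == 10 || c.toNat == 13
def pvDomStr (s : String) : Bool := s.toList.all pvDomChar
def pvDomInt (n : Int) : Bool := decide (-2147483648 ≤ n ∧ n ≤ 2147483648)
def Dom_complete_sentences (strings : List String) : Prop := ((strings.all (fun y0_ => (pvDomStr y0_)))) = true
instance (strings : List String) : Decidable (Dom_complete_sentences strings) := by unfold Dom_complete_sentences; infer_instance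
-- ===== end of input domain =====

-- B replaces A's streaming accumulator loop by index-based search-and-split (find the next sentence end, slice and join, resume after it); same cost, different algorithm shape.

-- ===== PORT A =====
def complete_sentences (strings : List String) : List String :=
  (strings.foldl
    (fun (st : List String × String) string =>
      let current := st.2 ++ string ++ " "
      if PySem.Str.pyGet? string (-1) = some '\'' then (st.1 ++ [current], "")
      else (st.1, current))
    ([], "")).1

-- ===== PORT B =====
-- _find_end of Source B: for i in range(start, len(strings)): if strings[i][-1] == "'": return i
-- (fuel = number of remaining indices; a totality guard only, always sufficient)
def csFindEndAux (strings : List String) : Nat → Nat → Option Nat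
  | 0, _ => none
  | fuel + 1, i =>
    if h : i < strings.length then
      if PySem.Str.pyGet? strings[i] (-1) = some '\'' then some i
      else csFindEndAux strings fuel (i + 1)
    else none

def csFindEnd (strings : List String) (start : Nat) : Option Nat :=
  csFindEndAux strings (strings.length - start) start

-- the while-True loop of Source B's complete_sentences (fuel is a totality guard, always sufficient)
def csLoopAux (strings : List String) : Nat → Nat → List String → List String
  | 0, _, out => out
  | fuel + 1, start, out =>
    match csFindEnd strings start with
    | none => out
    | some i =>
      csLoopAux strings fuel (i + 1)
        (out ++ [PySem.Str.join ""
          ((PySem.List.slice strings (some (start : Int)) (some ((i : Int) + 1))).map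
            (fun w => w ++ " "))])

def complete_sentences_alt (strings : List String) : List String :=
  csLoopAux strings (strings.length + 1) 0 []

-- ===== PRECONDITION & SPEC =====
-- Pre_ excludes exactly the inputs containing an empty string, on which A raises IndexError at string[-1].
def Pre_complete_sentences (strings : List String) : Prop := ∀ s ∈ strings, s ≠ ""
instance (strings : List String) : Decidable (Pre_complete_sentences strings) := by unfold Pre_complete_sentences; infer_instance
def pvWitness_complete_sentences : List String := (["Hi", "there'"])
def Spec_complete_sentences (strings : List String) (out : List String) : Prop := out = complete_sentences_alt strings
instance (strings : List String) (out : List String) : Decidable (Spec_complete_sentences strings out) := by unfold Spec_complete_sentences; infer_instance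

-- ===== CLAIM (what is proved, stated in full; the proofs are below) =====
def Claim_equal_complete_sentences : Prop := ∀ (strings : List String), Dom_complete_sentences strings → Pre_complete_sentences strings → Spec_complete_sentences strings (complete_sentences strings)

-- ===== LEMMAS AND PROOFS =====

/-- Proof-side reference shape: split off the prefix through the first
apostrophe-terminated string, plus the remainder. -/
def csSplit : List String → Option (List String × List String)
  | [] => none
  | head :: rest =>
    if PySem.Str.pyGet? head (-1) = some '\'' then some ([head], rest)
    else
      match csSplit rest with
      | none => none
      | some (pre, rem) => some (head :: pre, rem)

theorem csSplit_rest_lt (ss : List String) (pre rem : List String)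
    (h : csSplit ss = some (pre, rem)) : rem.length < ss.length := by
  induction ss generalizing pre rem with
  | nil => simp [csSplit] at h
  | cons head rest ih =>
    simp only [csSplit] at h
    split at h
    · cases h; simp
    · cases hr : csSplit rest with
      | none => rw [hr] at h; cases h
      | some pr =>
        rw [hr] at h
        cases h
        have := ih pr.1 pr.2 (by rw [hr])
        simp at this ⊢
        omega

/-- Proof-side reference recursion: peel one sentence, recurse. -/
def csAlt (strings : List String) : List String :=
  match h : csSplit strings with
  | none => []
  | some (sentence, rest) =>
    (PySem.Str.join "" (sentence.map (fun w => w ++ " "))) :: csAlt rest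
termination_by strings.length
decreasing_by exact csSplit_rest_lt strings sentence rest h

theorem csAlt_none (l : List String) (h : csSplit l = none) : csAlt l = [] := by
  rw [csAlt.eq_def]
  split
  · rfl
  · rename_i s r hsr; rw [h] at hsr; cases hsr

theorem csAlt_some (l pre rem : List String) (h : csSplit l = some (pre, rem)) :
    csAlt l = PySem.Str.join "" (pre.map (fun w => w ++ " ")) :: csAlt rem := by
  rw [csAlt.eq_def]
  split
  · rename_i hn; rw [h] at hn; cases hn
  · rename_i s r hsr
    rw [h] at hsr
    cases Option.some.inj hsr
    rfl

theorem csFindEndAux_bounds (strings : List String) (fuel start i : Nat)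
    (h : csFindEndAux strings fuel start = some i) : start ≤ i ∧ i < strings.length := by
  induction fuel generalizing start with
  | zero => simp [csFindEndAux] at h
  | succ fuel ih =>
    simp only [csFindEndAux] at h
    by_cases hl : start < strings.length
    · rw [dif_pos hl] at h
      by_cases hq : PySem.Str.pyGet? strings[start] (-1) = some '\''
      · rw [if_pos hq] at h; cases h; omega
      · rw [if_neg hq] at h; have := ih (start + 1) h; omega
    · rw [dif_neg hl] at h; cases h

/-- With sufficient fuel, the index search computes csSplit on the dropped suffix. -/
theorem csFindEndAux_eq (strings : List String) (fuel start : Nat)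
    (hf : strings.length ≤ start + fuel) :
    match csFindEndAux strings fuel start with
    | none => csSplit (strings.drop start) = none
    | some i => ∃ pre rem, csSplit (strings.drop start) = some (pre, rem) ∧
        start + pre.length = i + 1 ∧
        (strings.drop start).take pre.length = pre ∧
        strings.drop (i + 1) = rem := by
  induction fuel generalizing start with
  | zero =>
    simp only [csFindEndAux]
    rw [List.drop_eq_nil_iff.mpr (by omega), csSplit]
  | succ fuel ih =>
    simp only [csFindEndAux]
    by_cases hl : start < strings.length
    · rw [dif_pos hl]
      by_cases hq : PySem.Str.pyGet? strings[start] (-1) = some '\''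
      · rw [if_pos hq]
        refine ⟨[strings[start]], strings.drop (start + 1), ?_, by simp, ?_, rfl⟩
        · rw [List.drop_eq_getElem_cons hl, csSplit, if_pos hq]
        · rw [List.drop_eq_getElem_cons hl]
          simp only [List.length_cons, List.length_nil, List.take_succ_cons, List.take_zero]
      · rw [if_neg hq]
        rw [List.drop_eq_getElem_cons hl, csSplit, if_neg hq]
        have ih' := ih (start + 1) (by omega)
        cases hfnd : csFindEndAux strings fuel (start + 1) with
        | none => rw [hfnd] at ih'; simp only at ih'; rw [ih']
        | some j =>
          rw [hfnd] at ih'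
          obtain ⟨pre, rem, h1, h2, h3, h4⟩ := ih'
          refine ⟨strings[start] :: pre, rem, by rw [h1], by simp; omega, ?_, h4⟩
          simp only [List.length_cons, List.take_succ_cons, h3]
    · rw [dif_neg hl]
      rw [List.drop_eq_nil_iff.mpr (by omega), csSplit]

/-- With sufficient fuel, the outer loop computes csAlt of the dropped suffix. -/
theorem csLoopAux_eq (strings : List String) (fuel start : Nat) (out : List String)
    (hf : strings.length < start + fuel) :
    csLoopAux strings fuel start out = out ++ csAlt (strings.drop start) := by
  induction fuel generalizing start out with
  | zero =>
    simp only [csLoopAux]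
    rw [List.drop_eq_nil_iff.mpr (by omega), csAlt_none [] (by rw [csSplit])]
    simp
  | succ fuel ih =>
    simp only [csLoopAux, csFindEnd]
    have hs := csFindEndAux_eq strings (strings.length - start) start (by omega)
    cases hfnd : csFindEndAux strings (strings.length - start) start with
    | none =>
      rw [hfnd] at hs
      simp only at hs
      rw [csAlt_none _ hs]
      simp
    | some i =>
      rw [hfnd] at hs
      obtain ⟨pre, rem, h1, h2, h3, h4⟩ := hs
      have hb := csFindEndAux_bounds strings _ start i hfnd
      have hslice : PySem.List.slice strings (some (start : Int)) (some ((i : Int) + 1)) = pre := by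
        have hc : ((i : Int) + 1) = (((i + 1 : Nat)) : Int) := by push_cast; ring
        rw [hc, PySem.List.slice_natCast]
        have hl : i + 1 - start = pre.length := by omega
        rw [hl, h3]
      dsimp only
      rw [ih (i + 1) _ (by omega), csAlt_some _ pre rem h1, h4, hslice]
      simp

/-- A's running sentence for a pending group. -/
def csCat : List String → String
  | [] => ""
  | x :: xs => x ++ " " ++ csCat xs

theorem csCat_snoc (g : List String) (s : String) :
    csCat (g ++ [s]) = csCat g ++ s ++ " " := by
  induction g with
  | nil => simp [csCat]
  | cons x xs ih => simp [csCat, ih, String.append_assoc]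

theorem str_join_empty_cons (p : String) (rest : List String) :
    PySem.Str.join "" (p :: rest) = p ++ PySem.Str.join "" rest := by
  apply String.ext
  cases rest with
  | nil => simp [PySem.Str.toList_join, PySem.Chars.join, List.intercalate]
  | cons q qs => simp [PySem.Str.toList_join, PySem.Chars.join_cons_cons]

theorem fmt_eq_csCat (g : List String) :
    PySem.Str.join "" (g.map (fun w => w ++ " ")) = csCat g := by
  induction g with
  | nil => simp [csCat, PySem.Str.join]
  | cons x xs ih => simp [csCat, str_join_empty_cons, ih, String.append_assoc]

theorem loop_eq (ss : List String) (group sentences : List String) :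
    (ss.foldl
      (fun (st : List String × String) string =>
        let current := st.2 ++ string ++ " "
        if PySem.Str.pyGet? string (-1) = some '\'' then (st.1 ++ [current], "")
        else (st.1, current))
      (sentences, csCat group)).1
    = sentences ++
      (match csSplit ss with
       | none => []
       | some (pre, rest) => csCat (group ++ pre) :: csAlt rest) := by
  induction ss generalizing group sentences with
  | nil => simp [csSplit]
  | cons s rest ih =>
    simp only [List.foldl_cons, csSplit]
    by_cases h : PySem.Str.pyGet? s (-1) = some '\''
    · simp only [h, if_true]
      have h1 : csCat group ++ s ++ " " = csCat (group ++ [s]) := (csCat_snoc group s).symm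
      rw [h1]
      have := ih [] (sentences ++ [csCat (group ++ [s])])
      simp only [csCat] at this
      rw [this]
      rw [csAlt.eq_def]
      cases hr : csSplit rest with
      | none => simp
      | some pr =>
        cases pr with
        | mk pre rem => simp [fmt_eq_csCat]
    · simp only [h, if_false]
      have h1 : csCat group ++ s ++ " " = csCat (group ++ [s]) := (csCat_snoc group s).symm
      rw [h1, ih]
      cases hr : csSplit rest with
      | none => simp
      | some pr =>
        cases pr with
        | mk pre rem => simp

-- ===== VERDICT (by name: the statement is the Claim_ definition above) =====
theorem complete_sentences_spec : Claim_equal_complete_sentences := by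
  intro strings _ _
  unfold Spec_complete_sentences complete_sentences complete_sentences_alt
  rw [csLoopAux_eq strings (strings.length + 1) 0 [] (by omega)]
  have := loop_eq strings [] []
  simp only [csCat] at this
  rw [List.drop_zero, List.nil_append, this]
  cases hr : csSplit strings with
  | none => rw [csAlt_none _ hr]; simp
  | some pr =>
    cases pr with
    | mk pre rem => rw [csAlt_some _ pre rem hr]; simp [fmt_eq_csCat]
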